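-- pv_equiv track=rewrite | github.com/Mac-Shaw/arXiv-filter | run.py | highlight_word
-- ===== SOURCE A (Python) =====
-- def highlight_word(text, lower_text, lower_word):
--     if lower_word not in lower_text:
--         return text
--
--     sentences = lower_text.split(lower_word)
--     idx = 0
--     new_text = ""
--     for sentence in sentences[:-1]:
--         new_text += text[idx : idx + len(sentence)]
--         idx += len(sentence)
--         new_text += f'<span style="background-color: orange;">{text[idx:idx+len(lower_word)]}</span>'
--         idx += len(lower_word)
--     new_text += text[idx : idx + len(sentences[-1])]
--     return new_text
-- ===== SOURCE B (Python) =====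
-- def highlight_word(text, lower_text, lower_word):
--     if lower_word not in lower_text:
--         return text
--
--     # scan lower_text with a cursor and repeated find instead of splitting;
--     # all positions are indices into lower_text, so the tail slice is bounded
--     # by its length n.
--     n = len(lower_text)
--     out = ""
--     pos = 0
--     i = lower_text.find(lower_word, pos)
--     while i != -1:
--         out += text[pos:i]
--         out += f'<span style="background-color: orange;">{text[i:i+len(lower_word)]}</span>'
--         pos = i + len(lower_word)
--         i = lower_text.find(lower_word, pos)
--     out += text[pos:n]
--     return out
-- ===== Notes on version B (the rewrite author's own statement) =====
-- stated objective: idiomatic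
-- what changed: Replaces A's split-into-pieces-then-walk-an-index reconstruction with a single cursor loop that repeatedly calls str.find on lower_text and appends the slice before each match and the wrapped match directly.
import Mathlib
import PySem

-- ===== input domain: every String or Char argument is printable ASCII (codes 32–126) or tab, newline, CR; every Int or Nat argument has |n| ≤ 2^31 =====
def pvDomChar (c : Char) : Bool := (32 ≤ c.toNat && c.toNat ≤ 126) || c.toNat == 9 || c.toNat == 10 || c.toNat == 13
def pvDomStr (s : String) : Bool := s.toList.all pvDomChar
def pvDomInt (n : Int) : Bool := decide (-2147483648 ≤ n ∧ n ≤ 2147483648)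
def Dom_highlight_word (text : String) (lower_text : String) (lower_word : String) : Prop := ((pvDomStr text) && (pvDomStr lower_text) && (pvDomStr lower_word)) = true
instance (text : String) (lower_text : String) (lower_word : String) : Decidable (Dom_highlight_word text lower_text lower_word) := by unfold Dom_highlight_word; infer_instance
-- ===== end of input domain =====

-- B replaces A's split-and-walk with an idiomatic cursor + repeated-find scan; return values proved equal (for nonempty lower_word).

-- shared literal constants (the f-string pieces)
def pvSpanOpen : List Char := "<span style=\"background-color: orange;\">".toList
def pvSpanClose : List Char := "</span>".toList

-- ===== PORT A =====
-- A's loop body (the f-string append), as a named step function of the foldl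
def pvStepA (t w : List Char) (st : Nat × List Char) (sentence : List Char) : Nat × List Char :=
  let new_text := st.2 ++ PySem.List.slice t (some (st.1 : Int)) (some ((st.1 + sentence.length : Nat) : Int))
  let idx := st.1 + sentence.length
  let new_text := new_text ++ pvSpanOpen ++ PySem.List.slice t (some (idx : Int)) (some ((idx + w.length : Nat) : Int)) ++ pvSpanClose
  (idx + w.length, new_text)

def highlight_word (text : String) (lower_text : String) (lower_word : String) : String :=
  if PySem.Str.isIn lower_word lower_text = false then text
  else
    match PySem.Chars.split? lower_text.toList lower_word.toList with
    | none => ""   -- Python raises ValueError here (lower_word = ""); excluded by Pre_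
    | some sentences =>
      let st := (PySem.List.slice sentences none (some (-1))).foldl
        (pvStepA text.toList lower_word.toList) (0, [])
      String.ofList (st.2 ++ PySem.List.slice text.toList (some (st.1 : Int))
        (some ((st.1 + (PySem.List.pyGetD sentences (-1 : Int) []).length : Nat) : Int)))

-- ===== PORT B =====
-- cursor loop: i = lower_text.find(lower_word, pos); fuel only makes the recursion
-- total (it never runs out when lower_word ≠ "", see Pre_)
def pvAltLoop (t s w : List Char) : Nat → Nat → List Char → List Char
  | 0, _, out => out
  | fuel+1, pos, out =>
    let i := PySem.Chars.findFrom s w (pos : Int)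
    if i = -1 then out ++ PySem.List.slice t (some (pos : Int)) (some (s.length : Int))
    else pvAltLoop t s w fuel (i.toNat + w.length)
      (out ++ PySem.List.slice t (some (pos : Int)) (some i)
           ++ pvSpanOpen ++ PySem.List.slice t (some i) (some (i + (w.length : Int))) ++ pvSpanClose)

def highlight_word_alt (text : String) (lower_text : String) (lower_word : String) : String :=
  if PySem.Str.isIn lower_word lower_text = false then text
  else String.ofList
    (pvAltLoop text.toList lower_text.toList lower_word.toList (lower_text.toList.length + 1) 0 [])

-- ===== PRECONDITION & SPEC =====
-- Pre_ excludes exactly lower_word = "", on which A raises ValueError (str.split('')).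
def Pre_highlight_word (text : String) (lower_text : String) (lower_word : String) : Prop := lower_word ≠ ""
instance (text : String) (lower_text : String) (lower_word : String) : Decidable (Pre_highlight_word text lower_text lower_word) := by unfold Pre_highlight_word; infer_instance

def pvWitness_highlight_word : String × String × String := ("Hello World", "hello world", "o")

def Spec_highlight_word (text : String) (lower_text : String) (lower_word : String) (out : String) : Prop := out = highlight_word_alt text lower_text lower_word
instance (text : String) (lower_text : String) (lower_word : String) (out : String) : Decidable (Spec_highlight_word text lower_text lower_word out) := by unfold Spec_highlight_word; infer_instance

-- ===== CLAIM (what is proved, stated in full; the proofs are below) =====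
def Claim_equal_highlight_word : Prop := ∀ (text : String) (lower_text : String) (lower_word : String), Dom_highlight_word text lower_text lower_word → Pre_highlight_word text lower_text lower_word → Spec_highlight_word text lower_text lower_word (highlight_word text lower_text lower_word)

-- ===== LEMMAS AND PROOFS =====

-- proof-side split specification (first occurrence, recursively)
def pvSplitF (w : List Char) (hw : w ≠ []) (l : List Char) : List (List Char) :=
  if h : w <:+: l then
    List.take (PySem.Chars.find l w).toNat l ::
      pvSplitF w hw (List.drop ((PySem.Chars.find l w).toNat + w.length) l)
  else [l]
termination_by l.length
decreasing_by
  have h1 : 0 < w.length := List.length_pos_iff.mpr hw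
  have h2 : w.length ≤ l.length := h.length_le
  simp [List.length_drop]; omega

-- proof-side recursion computing the highlighted text from the pieces
def pvAGo (t w : List Char) : Nat → List (List Char) → List Char
  | _, [] => []
  | idx, [p] => List.take p.length (List.drop idx t)
  | idx, p :: q :: rest =>
      List.take p.length (List.drop idx t)
      ++ pvSpanOpen ++ List.take w.length (List.drop (idx + p.length) t) ++ pvSpanClose
      ++ pvAGo t w (idx + p.length + w.length) (q :: rest)

theorem pvSplitF_ne_nil (w : List Char) (hw : w ≠ []) (l : List Char) : pvSplitF w hw l ≠ [] := by
  rw [pvSplitF]; split_ifs <;> simp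

theorem pv_find_eq (w l : List Char) (k : Nat) (h1 : w <+: List.drop k l)
    (h2 : ∀ i < k, ¬ w <+: List.drop i l) : PySem.Chars.find l w = k := by
  have hin : w <:+: l := h1.isInfix.trans (List.drop_suffix k l).isInfix
  have hnn : 0 ≤ PySem.Chars.find l w := (PySem.Chars.find_nonneg_iff _ _).mpr hin
  obtain ⟨hpre, hmin⟩ := PySem.Chars.find_spec hnn
  rcases lt_trichotomy (PySem.Chars.find l w).toNat k with h | h | h
  · exact absurd hpre (h2 _ h)
  · omega
  · exact absurd h1 (hmin k h)

theorem pv_find_prefix (w l : List Char) (h : w <+: l) : PySem.Chars.find l w = 0 := by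
  have := pv_find_eq w l 0 (by simpa using h) (by omega)
  simpa using this

theorem pv_find_cons (w : List Char) (c : Char) (rest : List Char)
    (hnp : ¬ w <+: (c :: rest)) (hin : w <:+: rest) :
    PySem.Chars.find (c :: rest) w = PySem.Chars.find rest w + 1 := by
  have hnn : 0 ≤ PySem.Chars.find rest w := (PySem.Chars.find_nonneg_iff _ _).mpr hin
  obtain ⟨hpre, hmin⟩ := PySem.Chars.find_spec hnn
  have h := pv_find_eq w (c :: rest) ((PySem.Chars.find rest w).toNat + 1)
    (by simpa using hpre)
    (by
      intro i hi
      cases i with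
      | zero => simpa using hnp
      | succ j => simpa using hmin j (by omega))
  rw [h]; push_cast; omega

theorem pv_len_bound (w l : List Char) (hin : w <:+: l) :
    (PySem.Chars.find l w).toNat + w.length ≤ l.length := by
  have hnn : 0 ≤ PySem.Chars.find l w := (PySem.Chars.find_nonneg_iff _ _).mpr hin
  obtain ⟨hpre, _⟩ := PySem.Chars.find_spec hnn
  have h1 : w.length ≤ (List.drop (PySem.Chars.find l w).toNat l).length := hpre.length_le
  have h2 : PySem.Chars.find l w ≤ l.length := PySem.Chars.find_le_length l w
  simp [List.length_drop] at h1
  omega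

theorem pv_go_main (w : List Char) (hw : w ≠ []) :
    ∀ (fuel : Nat) (l cur : List Char) (acc : List (List Char)), l.length ≤ fuel →
    PySem.Chars.splitOn.go w fuel l cur acc
      = acc.reverse ++ List.modifyHead (fun x => cur.reverse ++ x) (pvSplitF w hw l) := by
  intro fuel
  induction fuel with
  | zero =>
    intro l cur acc hl
    have : l = [] := List.eq_nil_of_length_eq_zero (by omega)
    subst this
    rw [PySem.Chars.splitOn.go.eq_def]
    rw [pvSplitF]
    have : ¬ w <:+: ([] : List Char) := by simpa [List.infix_nil] using hw
    simp [this]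
  | succ fuel IH =>
    intro l cur acc hl
    cases l with
    | nil =>
      rw [PySem.Chars.splitOn.go.eq_def]
      rw [pvSplitF]
      have : ¬ w <:+: ([] : List Char) := by simpa [List.infix_nil] using hw
      simp [this]
    | cons c rest =>
      rw [PySem.Chars.splitOn.go.eq_def]
      dsimp only
      by_cases hp : w.isPrefixOf (c :: rest) = true
      · rw [if_pos hp]
        have hpre : w <+: (c :: rest) := by
          rwa [← List.isPrefixOf_iff_prefix]
        have hlen : (List.drop w.length (c :: rest)).length ≤ fuel := by
          have h1 : 0 < w.length := List.length_pos_iff.mpr hw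
          simp only [List.length_drop, List.length_cons] at *
          omega
        rw [IH _ _ _ hlen]
        have hin : w <:+: (c :: rest) := hpre.isInfix
        conv_rhs => rw [pvSplitF]
        rw [dif_pos hin, pv_find_prefix w (c :: rest) hpre]
        simp [List.modifyHead]
        generalize pvSplitF w hw (List.drop w.length (c :: rest)) = xs
        cases xs <;> rfl
      · rw [if_neg hp]
        have hnp : ¬ w <+: (c :: rest) := by
          rwa [← List.isPrefixOf_iff_prefix]
        have hlen : rest.length ≤ fuel := by simp at hl; omega
        rw [IH _ _ _ hlen]
        by_cases hin : w <:+: rest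
        · have hin' : w <:+: (c :: rest) := List.infix_cons_iff.mpr (Or.inr hin)
          have hnn : 0 ≤ PySem.Chars.find rest w := (PySem.Chars.find_nonneg_iff _ _).mpr hin
          conv_rhs => rw [pvSplitF]
          rw [dif_pos hin', pv_find_cons w c rest hnp hin]
          have htn : (PySem.Chars.find rest w + 1).toNat = (PySem.Chars.find rest w).toNat + 1 := by omega
          rw [htn]
          have harr : (PySem.Chars.find rest w).toNat + 1 + w.length
              = ((PySem.Chars.find rest w).toNat + w.length) + 1 := by omega
          rw [harr, List.drop_succ_cons, List.take_succ_cons]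
          conv_lhs => rw [pvSplitF]
          rw [dif_pos hin]
          simp [List.modifyHead, List.append_assoc]
        · have hin' : ¬ w <:+: (c :: rest) := by
            intro h
            rcases List.infix_cons_iff.mp h with h | h
            · exact hnp h
            · exact hin h
          conv_rhs => rw [pvSplitF]
          rw [dif_neg hin']
          conv_lhs => rw [pvSplitF]
          rw [dif_neg hin]
          simp [List.modifyHead]

theorem pv_split_eq (w : List Char) (hw : w ≠ []) (s : List Char) :
    PySem.Chars.splitOn s w = pvSplitF w hw s := by
  rw [PySem.Chars.splitOn.eq_def]
  rw [pv_go_main w hw (s.length + 1) s [] [] (by omega)]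
  generalize pvSplitF w hw s = xs
  cases xs <;> simp

theorem pvStepA_eq (t w : List Char) (idx : Nat) (acc : List Char) (p : List Char) :
    pvStepA t w (idx, acc) p
      = (idx + p.length + w.length,
         acc ++ List.take p.length (List.drop idx t)
             ++ (pvSpanOpen ++ (List.take w.length (List.drop (idx + p.length) t) ++ pvSpanClose))) := by
  simp only [pvStepA, PySem.List.slice_natCast, Nat.add_sub_cancel_left]
  simp [List.append_assoc]

theorem pv_a_fold (t w : List Char) :
    ∀ (pieces : List (List Char)) (hp : pieces ≠ []) (idx : Nat) (acc : List Char),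
    (pieces.dropLast.foldl (pvStepA t w) (idx, acc)).2
      ++ List.take (pieces.getLast hp).length
           (List.drop (pieces.dropLast.foldl (pvStepA t w) (idx, acc)).1 t)
      = acc ++ pvAGo t w idx pieces := by
  intro pieces
  induction pieces with
  | nil => intro hp; exact absurd rfl hp
  | cons p rest IH =>
    intro hp idx acc
    cases rest with
    | nil => simp [pvAGo]
    | cons q rest' =>
      have hne : (q :: rest') ≠ [] := by simp
      rw [List.dropLast_cons₂, List.foldl_cons, pvStepA_eq,
          List.getLast_cons hne]
      rw [IH hne]
      simp [pvAGo]

theorem pv_b_main (t s w : List Char) (hw : w ≠ []) :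
    ∀ (fuel pos : Nat) (acc : List Char), pos ≤ s.length → s.length + 1 ≤ fuel + pos →
    pvAltLoop t s w fuel pos acc = acc ++ pvAGo t w pos (pvSplitF w hw (List.drop pos s)) := by
  intro fuel
  induction fuel with
  | zero => intro pos acc h1 h2; omega
  | succ fuel IH =>
    intro pos acc hpos hfuel
    rw [pvAltLoop]
    rw [PySem.Chars.findFrom_natCast s w pos hpos]
    by_cases hf : PySem.Chars.find (List.drop pos s) w = -1
    · have hnin : ¬ w <:+: List.drop pos s := (PySem.Chars.find_eq_neg_one_iff _ _).mp hf
      rw [if_pos (by simp [hf]), pvSplitF, dif_neg hnin]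
      simp [pvAGo, PySem.List.slice_natCast, List.length_drop]
    · have hin : w <:+: List.drop pos s := (PySem.Chars.find_ne_neg_one_iff _ _).mp hf
      have hnn : 0 ≤ PySem.Chars.find (List.drop pos s) w :=
        (PySem.Chars.find_nonneg_iff _ _).mpr hin
      set k := PySem.Chars.find (List.drop pos s) w with hk
      have hwpos : 0 < w.length := List.length_pos_iff.mpr hw
      have hbound : k.toNat + w.length ≤ s.length - pos := by
        have := pv_len_bound w (List.drop pos s) hin
        simpa [List.length_drop] using this
      simp only [if_neg hf]
      rw [if_neg (by omega)]
      have htn : ((pos : Int) + k).toNat = pos + k.toNat := by omega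
      rw [htn]
      rw [IH (pos + k.toNat + w.length) _ (by omega) (by omega)]
      conv_rhs => rw [pvSplitF]
      rw [dif_pos hin]
      have hdd : List.drop (k.toNat + w.length) (List.drop pos s)
          = List.drop (pos + k.toNat + w.length) s := by
        rw [List.drop_drop]; ring_nf
      rw [hdd]
      obtain ⟨q, rest', hq⟩ :=
        List.exists_cons_of_ne_nil (pvSplitF_ne_nil w hw (List.drop (pos + k.toNat + w.length) s))
      rw [hq]
      have hlen : (List.take k.toNat (List.drop pos s)).length = k.toNat := by
        simp [List.length_take, List.length_drop]; omega
      conv_rhs => rw [pvAGo]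
      rw [hlen]
      rw [show (pos : Int) + k = ((pos + k.toNat : Nat) : Int) by push_cast; omega]
      rw [show ((pos + k.toNat : Nat) : Int) + (w.length : Int)
            = ((pos + k.toNat + w.length : Nat) : Int) by push_cast; omega]
      rw [PySem.List.slice_natCast, PySem.List.slice_natCast]
      have h1 : pos + k.toNat - pos = k.toNat := by omega
      have h2 : pos + k.toNat + w.length - (pos + k.toNat) = w.length := by omega
      rw [h1, h2]
      simp [List.append_assoc]

theorem pv_last_eq (xs : List (List Char)) (h : xs ≠ []) :
    PySem.List.pyGetD xs (-1 : Int) [] = xs.getLast h := by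
  rw [PySem.List.pyGetD_neg_ofNat xs 1 [] (by omega) (by
    have := List.length_pos_iff.mpr h; omega)]
  rw [List.getLast_eq_getElem]

-- ===== VERDICT (by name: the statement is the Claim_ definition above) =====
theorem highlight_word_spec : Claim_equal_highlight_word := by
  intro text lower_text lower_word _ hpre
  unfold Spec_highlight_word highlight_word highlight_word_alt
  by_cases hg : PySem.Str.isIn lower_word lower_text = false
  · rw [if_pos hg, if_pos hg]
  · simp only [hg]
    have hw : lower_word.toList ≠ [] := by
      intro h
      exact hpre (by
        have := congrArg String.ofList h
        simpa using this)
    have hsplit : PySem.Chars.split? lower_text.toList lower_word.toList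
        = some (pvSplitF lower_word.toList hw lower_text.toList) := by
      simp [PySem.Chars.split?, List.isEmpty_iff, hw, pv_split_eq lower_word.toList hw]
    rw [hsplit]
    simp only
    set pieces := pvSplitF lower_word.toList hw lower_text.toList with hpieces
    have hpne : pieces ≠ [] := pvSplitF_ne_nil _ _ _
    rw [PySem.List.slice_to_neg_one]
    rw [pv_last_eq pieces hpne]
    rw [PySem.List.slice_natCast]
    have h1 : ∀ (st : Nat × List Char) (n : Nat), st.1 + n - st.1 = n := by omega
    rw [h1]
    rw [pv_a_fold text.toList lower_word.toList pieces hpne 0 []]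
    rw [pv_b_main text.toList lower_text.toList lower_word.toList hw
        (lower_text.toList.length + 1) 0 [] (by omega) (by omega)]
    simp [hpieces]
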